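-- pv_equiv track=rewrite | github.com/gourav2001k/Algorithms-CP | LC-Daily/LC1717.py | helper
-- ===== SOURCE A (Python) =====
-- def helper(s, c):
--     out, n = 0, len(s)
--     stack = []
--     for i in range(n):
--         if s[i] == 'b' and stack and stack[-1] == 'a':
--             out += c
--             stack.pop()
--         else:
--             stack.append(s[i])
--     return out, ''.join(stack)
-- ===== SOURCE B (Python) =====
-- def helper(s, c):
--     n = len(s)
--     while 'ab' in s:
--         s = s.replace('ab', '')
--     return c * ((n - len(s)) // 2), s
-- ===== Notes on version B (the rewrite author's own statement) =====
-- stated objective: alternative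
-- what changed: A does one left-to-right pass with an explicit stack, adding c per removed pair; B instead repeatedly applies a global s.replace('ab','') until no 'ab' remains and computes the cost in closed form as c*((original_length - final_length)//2).
import Mathlib
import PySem

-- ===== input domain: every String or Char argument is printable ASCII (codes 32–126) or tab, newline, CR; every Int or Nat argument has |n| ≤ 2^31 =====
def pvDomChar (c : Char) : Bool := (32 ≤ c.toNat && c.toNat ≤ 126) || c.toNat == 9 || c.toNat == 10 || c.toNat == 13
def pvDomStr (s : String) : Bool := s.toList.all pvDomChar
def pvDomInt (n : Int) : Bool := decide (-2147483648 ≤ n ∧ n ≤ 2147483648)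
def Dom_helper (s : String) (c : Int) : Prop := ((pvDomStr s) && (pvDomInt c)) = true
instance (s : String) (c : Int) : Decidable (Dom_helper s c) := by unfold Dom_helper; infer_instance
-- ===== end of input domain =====

-- B = repeated global 'ab'-elimination via str.replace with the cost computed from the
-- length drop (alternative strategy; A is a single-pass stack) — return values proved equal.

-- ===== PORT A =====
-- one loop step of A: pop a matching 'a' (adding c to out) or push s[i]
def stepA (c : Int) (st : Int × List Char) (x : Char) : Int × List Char :=
  if x = 'b' ∧ st.2 ≠ [] ∧ st.2.getLast? = some 'a' then (st.1 + c, st.2.dropLast)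
  else (st.1, st.2 ++ [x])

def helper (s : String) (c : Int) : Int × String :=
  let r := s.toList.foldl (stepA c) (0, [])
  (r.1, String.ofList r.2)

-- ===== PORT B =====
-- termination facts for B's while-loop: replacing 'ab'→'' strictly shortens a string containing 'ab'
theorem go_ab_len_le (fuel : Nat) : ∀ (l acc : List Char),
    (PySem.Chars.replace.go ['a','b'] [] fuel l acc).length ≤ acc.length + l.length := by
  induction fuel with
  | zero => intro l acc; simp [PySem.Chars.replace.go]
  | succ f ih =>
    intro l acc
    cases l with
    | nil => simp [PySem.Chars.replace.go]
    | cons c t =>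
      rw [PySem.Chars.replace.go]
      split
      · have := ih (List.drop 2 (c :: t)) acc
        simp at this ⊢
        omega
      · have := ih t (c :: acc)
        simp at this ⊢
        omega

theorem go_ab_len_lt (fuel : Nat) : ∀ (l acc : List Char), ['a','b'] <:+: l → l.length ≤ fuel →
    (PySem.Chars.replace.go ['a','b'] [] fuel l acc).length < acc.length + l.length := by
  induction fuel with
  | zero =>
    intro l acc hinf hlen
    have : l = [] := List.eq_nil_of_length_eq_zero (Nat.le_zero.mp hlen)
    subst this
    have := hinf.length_le
    simp at this
  | succ f ih =>
    intro l acc hinf hlen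
    cases l with
    | nil =>
      have := hinf.length_le; simp at this
    | cons c t =>
      rw [PySem.Chars.replace.go]
      split
      · rename_i hpre
        have h2 : 2 ≤ (c :: t).length := by
          have := List.isPrefixOf_iff_prefix.mp hpre
          have := this.length_le
          simpa using this
        have := go_ab_len_le f (List.drop 2 (c :: t)) acc
        simp at this ⊢
        omega
      · rename_i hpre
        have hinf' : ['a','b'] <:+: t := by
          rcases List.infix_cons_iff.mp hinf with h | h
          · exact absurd (List.isPrefixOf_iff_prefix.mpr h) (by simpa using hpre)
          · exact h
        have := ih t (c :: acc) hinf' (by simpa using Nat.le_of_succ_le_succ (by simpa using hlen))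
        simp at this ⊢
        omega

theorem replace_ab_length_lt (l : List Char) (h : ['a','b'] <:+: l) :
    (PySem.Chars.replace l ['a','b'] []).length < l.length := by
  have := go_ab_len_lt l.length l [] h le_rfl
  simpa [PySem.Chars.replace] using this

-- B's while-loop: while 'ab' in s: s = s.replace('ab','')
def helperAltLoop (s : String) : String :=
  if PySem.Str.isIn "ab" s = true then helperAltLoop (PySem.Str.replace s "ab" "") else s
termination_by s.toList.length
decreasing_by
  rename_i h
  have hinf : ['a','b'] <:+: s.toList := by
    have := (PySem.Chars.isIn_iff_infix "ab".toList s.toList).mp (by simpa [PySem.Str.isIn_eq] using h)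
    simpa using this
  have := replace_ab_length_lt s.toList hinf
  simpa [PySem.Str.toList_replace] using this

def helper_alt (s : String) (c : Int) : Int × String :=
  let n := PySem.Str.len s
  let t := helperAltLoop s
  (c * PySem.Int.floordiv (n - PySem.Str.len t) 2, t)

-- ===== PRECONDITION & SPEC =====
def Spec_helper (s : String) (c : Int) (out : Int × String) : Prop := out = helper_alt s c
instance (s : String) (c : Int) (out : Int × String) : Decidable (Spec_helper s c out) := by unfold Spec_helper; infer_instance

-- ===== CLAIM (what is proved, stated in full; the proofs are below) =====
def Claim_equal_helper : Prop := ∀ (s : String) (c : Int), Dom_helper s c → Spec_helper s c (helper s c)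

-- ===== LEMMAS AND PROOFS =====

-- pure stack transition (A's stack without the cost accumulator)
def pushA (S : List Char) (x : Char) : List Char :=
  if x = 'b' ∧ S ≠ [] ∧ S.getLast? = some 'a' then S.dropLast else S ++ [x]

theorem foldl_pushA_ab (S v) : List.foldl pushA S ('a' :: 'b' :: v) = List.foldl pushA S v := by
  simp [pushA]

-- A's fold: cost is c·k, the stack is the pushA-fold, and lengths balance (k = pairs removed)
theorem foldA_spec (c : Int) : ∀ (xs : List Char) (o : Int) (S : List Char), ∃ k : Nat,
    (xs.foldl (stepA c) (o, S)).1 = o + c * k ∧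
    (xs.foldl (stepA c) (o, S)).2 = xs.foldl pushA S ∧
    S.length + xs.length = 2 * k + (xs.foldl pushA S).length := by
  intro xs
  induction xs with
  | nil => intro o S; exact ⟨0, by simp, by simp, by simp⟩
  | cons x xs ih =>
    intro o S
    by_cases h : x = 'b' ∧ S ≠ [] ∧ S.getLast? = some 'a'
    · obtain ⟨k, h1, h2, h3⟩ := ih (o + c) S.dropLast
      have hS : 1 ≤ S.length := List.length_pos_iff.mpr h.2.1
      refine ⟨k + 1, ?_, ?_, ?_⟩
      · simp only [List.foldl_cons, stepA, if_pos h, h1]; push_cast; ring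
      · simp only [List.foldl_cons, stepA, pushA, if_pos h, h2]
      · simp only [List.foldl_cons, pushA, if_pos h] at h3 ⊢
        simp [List.length_dropLast] at h3 ⊢
        omega
    · obtain ⟨k, h1, h2, h3⟩ := ih o (S ++ [x])
      refine ⟨k, ?_, ?_, ?_⟩
      · simp only [List.foldl_cons, stepA, if_neg h, h1]
      · simp only [List.foldl_cons, stepA, pushA, if_neg h, h2]
      · simp only [List.foldl_cons, pushA, if_neg h]
        simp at h3 ⊢
        omega

-- the pushA-fold is invariant under one global replace('ab','')
theorem go_cancel (fuel : Nat) : ∀ (l acc S : List Char),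
    List.foldl pushA S (acc.reverse ++ l) =
      List.foldl pushA S (PySem.Chars.replace.go ['a','b'] [] fuel l acc) := by
  induction fuel with
  | zero => intro l acc S; simp [PySem.Chars.replace.go]
  | succ f ih =>
    intro l acc S
    cases l with
    | nil => simp [PySem.Chars.replace.go]
    | cons c t =>
      rw [PySem.Chars.replace.go]
      split
      · rename_i hpre
        cases t with
        | nil => simp [List.isPrefixOf] at hpre
        | cons d t2 =>
          simp [List.isPrefixOf] at hpre
          obtain ⟨rfl, rfl⟩ := hpre
          have : List.foldl pushA S (acc.reverse ++ 'a' :: 'b' :: t2) =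
              List.foldl pushA S (acc.reverse ++ t2) := by
            rw [List.foldl_append, List.foldl_append, foldl_pushA_ab]
          rw [this]
          simpa using ih (List.drop 2 ('a' :: 'b' :: t2)) acc S
      · have := ih t (c :: acc) S
        simpa [List.append_assoc] using this

theorem foldl_pushA_replace (l S : List Char) :
    List.foldl pushA S l = List.foldl pushA S (PySem.Chars.replace l ['a','b'] []) := by
  have := go_cancel l.length l [] S
  simpa [PySem.Chars.replace] using this

-- on an 'ab'-free string the stack algorithm is the identity
theorem pushA_no_ab_eval : ∀ (t : List Char) (h : Char) (S : List Char),
    ¬ (['a','b'] <:+: h :: t) → List.foldl pushA (S ++ [h]) t = S ++ h :: t := by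
  intro t
  induction t with
  | nil => intro h S _; simp
  | cons y t2 ih =>
    intro h S hno
    have hguard : ¬ (y = 'b' ∧ S ++ [h] ≠ [] ∧ (S ++ [h]).getLast? = some 'a') := by
      rintro ⟨rfl, -, hlast⟩
      rw [List.getLast?_concat] at hlast
      have : h = 'a' := by simpa using hlast
      subst this
      exact hno (List.infix_cons_iff.mpr (Or.inl ⟨t2, rfl⟩))
    have hno' : ¬ (['a','b'] <:+: y :: t2) := fun h' =>
      hno (List.infix_cons_iff.mpr (Or.inr h'))
    calc List.foldl pushA (S ++ [h]) (y :: t2)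
        = List.foldl pushA ((S ++ [h]) ++ [y]) t2 := by
          simp only [List.foldl_cons, pushA, if_neg hguard]
      _ = (S ++ [h]) ++ y :: t2 := ih y (S ++ [h]) hno'
      _ = S ++ h :: y :: t2 := by simp

theorem foldl_pushA_no_ab (t : List Char) (h : ¬ (['a','b'] <:+: t)) :
    List.foldl pushA [] t = t := by
  cases t with
  | nil => rfl
  | cons h0 t2 =>
    have : pushA [] h0 = [h0] := by simp [pushA]
    rw [List.foldl_cons, this]
    simpa using pushA_no_ab_eval t2 h0 [] h

-- B's loop computes the pushA-fold normal form and its result is 'ab'-free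
theorem helperAltLoop_spec (s : String) :
    List.foldl pushA [] s.toList = (helperAltLoop s).toList ∧
      ¬ (['a','b'] <:+: (helperAltLoop s).toList) := by
  induction s using helperAltLoop.induct with
  | case1 s hcond ih =>
    rw [helperAltLoop, if_pos hcond]
    refine ⟨?_, ih.2⟩
    rw [← ih.1, PySem.Str.toList_replace]
    simpa using foldl_pushA_replace s.toList []
  | case2 s hcond =>
    rw [helperAltLoop, if_neg hcond]
    have hno : ¬ (['a','b'] <:+: s.toList) := by
      intro h
      exact hcond ((PySem.Chars.isIn_iff_infix "ab".toList s.toList).mpr (by simpa using h))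
    exact ⟨foldl_pushA_no_ab s.toList hno, hno⟩

-- ===== VERDICT (by name: the statement is the Claim_ definition above) =====
theorem helper_spec : Claim_equal_helper := by
  intro s c _
  unfold Spec_helper helper helper_alt
  obtain ⟨k, h1, h2, h3⟩ := foldA_spec c s.toList 0 []
  obtain ⟨hfold, -⟩ := helperAltLoop_spec s
  have hsnd : (s.toList.foldl (stepA c) (0, [])).2 = (helperAltLoop s).toList := by
    rw [h2, hfold]
  have hlen : (s.toList.length : Int) - ((helperAltLoop s).toList.length : Int) = 2 * k := by
    rw [← hfold]
    simp only [List.length_nil, Nat.zero_add] at h3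
    omega
  refine Prod.ext ?_ ?_
  · show (s.toList.foldl (stepA c) (0, [])).1 = _
    rw [h1]
    simp only [PySem.Str.len_eq, hlen, PySem.Int.floordiv]
    rw [Int.mul_fdiv_cancel_left (k : Int) (by norm_num)]
    ring
  · show String.ofList (s.toList.foldl (stepA c) (0, [])).2 = _
    rw [hsnd]
    simp
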